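-- pv_equiv track=rewrite | github.com/ml-postech/PaT | PaT/utils/strings.py | wrap_string_as_triple_quotes
-- ===== SOURCE A (Python) =====
-- def wrap_string_as_triple_quotes(s: str) -> str:
--     """Put string into Pythonic triple quotes."""
--
--     def _escape(li: str, single_quote: bool, double_quote: bool) -> tuple[bool, str]:
--         escaped, ret = False, ""
--         for ch in li:
--             if ch == "'":
--                 ret += "\\'" if single_quote else "'"
--             elif ch == '"':
--                 ret += '\\"' if double_quote else '"'
--             elif ch == "\r":
--                 pass
--             elif ch == "\n":
--                 ret += "\n"
--             else:
--                 if ch == "\\":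
--                     escaped = True
--                 ret += ch
--         return escaped, ret
--
--     if "'" not in s and '"' not in s:
--         escaped, s = _escape(s, single_quote=False, double_quote=False)
--         ret = f'"""{s}"""'
--     elif "'" not in s and '"' in s:
--         escaped, s = _escape(s, single_quote=False, double_quote=False)
--         ret = f"'''{s}'''"
--     elif "'" in s and '"' not in s:
--         escaped, s = _escape(s, single_quote=False, double_quote=False)
--         ret = f'"""{s}"""'
--     else:
--         escaped, s = _escape(s, single_quote=False, double_quote=True)
--         ret = f'"""{s}"""'
--     prefix = "r" if escaped else ""
--     return prefix + ret
-- ===== SOURCE B (Python) =====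
-- def wrap_string_as_triple_quotes(s: str) -> str:
--     """Put string into Pythonic triple quotes."""
--     escaped = "\\" in s
--     has_single = "'" in s
--     has_double = '"' in s
--     t = s.replace("\r", "")
--     if not has_single and has_double:
--         quote = "'''"
--     else:
--         quote = '"""'
--         if has_single and has_double:
--             t = t.replace('"', '\\"')
--     return ("r" if escaped else "") + quote + t + quote
-- ===== Notes on version B (the rewrite author's own statement) =====
-- stated objective: simpler
-- what changed: Replaces the char-by-char accumulation loop with its four-way branch and threaded escaped-flag by three substring tests on the original string plus whole-string str.replace passes for CR-dropping and quote-escaping.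
import Mathlib
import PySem

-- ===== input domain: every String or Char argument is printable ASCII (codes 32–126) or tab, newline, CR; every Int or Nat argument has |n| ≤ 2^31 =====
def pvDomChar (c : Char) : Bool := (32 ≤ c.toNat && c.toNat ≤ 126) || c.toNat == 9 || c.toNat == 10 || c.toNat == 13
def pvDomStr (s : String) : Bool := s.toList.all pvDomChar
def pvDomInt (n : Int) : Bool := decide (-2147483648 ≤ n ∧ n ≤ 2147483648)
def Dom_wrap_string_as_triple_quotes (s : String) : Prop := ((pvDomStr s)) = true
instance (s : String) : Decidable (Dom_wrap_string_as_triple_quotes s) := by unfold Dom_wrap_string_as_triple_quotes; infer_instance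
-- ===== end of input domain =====

-- B changes: three substring tests plus whole-string replace passes instead of A's char-by-char accumulation loop (objective: simpler).

-- ===== PORT A =====
-- the body of _escape's for-loop, one step of the fold over the characters
def escapeA_step (sq dq : Bool) (st : Bool × List Char) (ch : Char) : Bool × List Char :=
  if ch = '\'' then (st.1, st.2 ++ (if sq then ['\\', '\''] else ['\'']))
  else if ch = '"' then (st.1, st.2 ++ (if dq then ['\\', '"'] else ['"']))
  else if ch = '\r' then st
  else if ch = '\n' then (st.1, st.2 ++ ['\n'])
  else ((if ch = '\\' then true else st.1), st.2 ++ [ch])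

-- _escape(li, single_quote, double_quote) : (escaped, ret)
def escapeA (li : List Char) (sq dq : Bool) : Bool × List Char :=
  li.foldl (escapeA_step sq dq) (false, [])

def wrap_string_as_triple_quotes (s : String) : String :=
  let body :=
    if !(PySem.Str.isIn "'" s) && !(PySem.Str.isIn "\"" s) then
      let p := escapeA s.toList false false
      (p.1, ['"','"','"'] ++ p.2 ++ ['"','"','"'])
    else if !(PySem.Str.isIn "'" s) && (PySem.Str.isIn "\"" s) then
      let p := escapeA s.toList false false
      (p.1, ['\'','\'','\''] ++ p.2 ++ ['\'','\'','\''])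
    else if (PySem.Str.isIn "'" s) && !(PySem.Str.isIn "\"" s) then
      let p := escapeA s.toList false false
      (p.1, ['"','"','"'] ++ p.2 ++ ['"','"','"'])
    else
      let p := escapeA s.toList false true
      (p.1, ['"','"','"'] ++ p.2 ++ ['"','"','"'])
  String.ofList ((if body.1 then ['r'] else []) ++ body.2)

-- ===== PORT B =====
def wrap_string_as_triple_quotes_alt (s : String) : String :=
  let escaped := PySem.Str.isIn "\\" s
  let has_single := PySem.Str.isIn "'" s
  let has_double := PySem.Str.isIn "\"" s
  let t0 := PySem.Str.replace s "\r" ""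
  let qt : String × String :=
    if !has_single && has_double then ("'''", t0)
    else ("\"\"\"", if has_single && has_double then PySem.Str.replace t0 "\"" "\\\"" else t0)
  String.ofList ((if escaped then ['r'] else []) ++ qt.1.toList ++ qt.2.toList ++ qt.1.toList)

-- ===== PRECONDITION & SPEC =====
def Spec_wrap_string_as_triple_quotes (s : String) (out : String) : Prop := out = wrap_string_as_triple_quotes_alt s
instance (s : String) (out : String) : Decidable (Spec_wrap_string_as_triple_quotes s out) := by unfold Spec_wrap_string_as_triple_quotes; infer_instance

-- ===== CLAIM (what is proved, stated in full; the proofs are below) =====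
def Claim_equal_wrap_string_as_triple_quotes : Prop := ∀ (s : String), Dom_wrap_string_as_triple_quotes s → Spec_wrap_string_as_triple_quotes s (wrap_string_as_triple_quotes s)

-- ===== LEMMAS AND PROOFS =====

-- per-character effect of A's loop on the output string
def escChar (sq dq : Bool) (ch : Char) : List Char :=
  if ch = '\'' then (if sq then ['\\', '\''] else ['\''])
  else if ch = '"' then (if dq then ['\\', '"'] else ['"'])
  else if ch = '\r' then []
  else [ch]

theorem foldl_escapeA (sq dq : Bool) (li : List Char) (b : Bool) (acc : List Char) :
    li.foldl (escapeA_step sq dq) (b, acc)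
      = (b || li.contains '\\', acc ++ li.flatMap (escChar sq dq)) := by
  induction li generalizing b acc with
  | nil => simp
  | cons ch t ih =>
    by_cases h1 : ch = '\''
    · simp [escapeA_step, escChar, h1, ih]
    · by_cases h2 : ch = '"'
      · simp [escapeA_step, escChar, h1, h2, ih]
      · by_cases h3 : ch = '\r'
        · simp [escapeA_step, escChar, h1, h2, h3, ih]
        · by_cases h4 : ch = '\n'
          · simp [escapeA_step, escChar, h1, h2, h3, h4, ih]
          · by_cases h5 : ch = '\\'
            · simp [escapeA_step, escChar, h1, h2, h3, h4, h5, ih]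
            · simp [escapeA_step, escChar, h1, h2, h3, h4, h5, ih, Ne.symm h5]

theorem escapeA_eq (sq dq : Bool) (li : List Char) :
    escapeA li sq dq = (li.contains '\\', li.flatMap (escChar sq dq)) := by
  simpa [escapeA] using foldl_escapeA sq dq li false []

-- single-character-needle replace is a flatMap
theorem replace_go_single (c : Char) (new : List Char) (l : List Char) :
    ∀ (fuel : Nat) (acc : List Char), l.length ≤ fuel →
      PySem.Chars.replace.go [c] new fuel l acc
        = acc.reverse ++ l.flatMap (fun x => if x = c then new else [x]) := by
  induction l with
  | nil =>
    intro fuel acc _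
    cases fuel <;> simp [PySem.Chars.replace.go]
  | cons x t ih =>
    intro fuel acc hle
    cases fuel with
    | zero => simp at hle
    | succ n =>
      have hn : t.length ≤ n := by simp at hle; omega
      by_cases hx : x = c
      · have hp : ([c].isPrefixOf (x :: t)) = true := by simp [List.isPrefixOf, hx]
        simp only [PySem.Chars.replace.go]
        rw [if_pos hp]
        rw [show List.drop [c].length (x :: t) = t by simp]
        rw [ih n _ hn]
        simp [hx]
      · have hp : ([c].isPrefixOf (x :: t)) = false := by
          simp [List.isPrefixOf]; exact fun h => hx h.symm
        simp only [PySem.Chars.replace.go]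
        rw [if_neg (by simp [hp])]
        rw [ih n _ hn]
        simp [hx]

theorem replace_single (s : List Char) (c : Char) (new : List Char) :
    PySem.Chars.replace s [c] new = s.flatMap (fun x => if x = c then new else [x]) := by
  simpa [PySem.Chars.replace] using replace_go_single c new s s.length [] le_rfl

theorem isIn_single (n : String) (c : Char) (s : String) (ht : n.toList = [c]) :
    PySem.Str.isIn n s = s.toList.contains c := by
  by_cases h : c ∈ s.toList
  · simp [PySem.Chars.isIn_iff_infix, List.singleton_infix_iff, h, ht]
  · simp [PySem.Chars.isIn_eq_false_iff, List.singleton_infix_iff, h, ht]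

-- B's CR-drop pass equals A's escape with double_quote = False
theorem crdrop_eq (l : List Char) :
    l.flatMap (fun x => if x = '\r' then ([] : List Char) else [x]) = l.flatMap (escChar false false) := by
  apply List.flatMap_congr
  intro x _
  by_cases h1 : x = '\''
  · simp [escChar, h1]
  · by_cases h2 : x = '"'
    · simp [escChar, h1, h2]
    · by_cases h3 : x = '\r'
      · simp [escChar, h1, h2, h3]
      · simp [escChar, h1, h2, h3]

-- CR-drop then quote-escape equals A's escape with double_quote = True
theorem crdrop_qesc_eq (l : List Char) :
    (l.flatMap (escChar false false)).flatMap
        (fun x => if x = '"' then ['\\', '"'] else [x])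
      = l.flatMap (escChar false true) := by
  rw [List.flatMap_assoc]
  apply List.flatMap_congr
  intro x _
  by_cases h1 : x = '\''
  · simp [escChar, h1]
  · by_cases h2 : x = '"'
    · simp [escChar, h1, h2]
    · by_cases h3 : x = '\r'
      · simp [escChar, h1, h2, h3]
      · simp [escChar, h1, h2, h3]

-- ===== VERDICT (by name: the statement is the Claim_ definition above) =====
theorem wrap_string_as_triple_quotes_spec : Claim_equal_wrap_string_as_triple_quotes := by
  intro s _
  unfold Spec_wrap_string_as_triple_quotes wrap_string_as_triple_quotes wrap_string_as_triple_quotes_alt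
  simp only [isIn_single "'" '\'' s (by decide), isIn_single "\"" '"' s (by decide),
             isIn_single "\\" '\\' s (by decide), escapeA_eq]
  by_cases h1 : '\'' ∈ s.toList <;> by_cases h2 : '"' ∈ s.toList <;>
    simp [h1, h2, replace_single,
          show ("\r" : String).toList = ['\r'] by decide, show ("" : String).toList = [] by decide,
          show ("\"" : String).toList = ['"'] by decide,
          show ("\\\"" : String).toList = ['\\', '"'] by decide,
          show ("'''" : String).toList = ['\'', '\'', '\''] by decide,
          show ("\"\"\"" : String).toList = ['"', '"', '"'] by decide,
          crdrop_eq, crdrop_qesc_eq]
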